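-- pv_equiv track=rewrite | github.com/subinacls/Para | Server/modules/security/monitor/auth_log.py | first_5
-- ===== SOURCE A (Python) =====
-- def first_5(parsed_string):
--     result_5 = ""
--     count_all = 0
--     if len(parsed_string.split("|")) > 5:
--         index = 5
--         for item in parsed_string.split("|"):
--             if index > 0 and len(item) > 0:
--                 result_5 = result_5 + "|" + item
--                 index = index - 1
--             if len(item) > 0:
--                 count_all = count_all + 1
--     else:
--         for item in parsed_string.split("|"):
--             if len(item) > 0:
--                 result_5 = result_5 + "|" + item
--                 count_all = count_all + 1
--     return result_5, count_all
-- ===== SOURCE B (Python) =====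
-- def first_5(parsed_string):
--     items = [x for x in parsed_string.split("|") if len(x) > 0]
--     return "".join("|" + x for x in items[:5]), len(items)
-- ===== Notes on version B (the rewrite author's own statement) =====
-- stated objective: simpler
-- what changed: Materialize the non-empty fields once, then a slice+join builds the string and len gives the count, dropping A's redundant >5 branch and its interleaved countdown accumulator.
import Mathlib
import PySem

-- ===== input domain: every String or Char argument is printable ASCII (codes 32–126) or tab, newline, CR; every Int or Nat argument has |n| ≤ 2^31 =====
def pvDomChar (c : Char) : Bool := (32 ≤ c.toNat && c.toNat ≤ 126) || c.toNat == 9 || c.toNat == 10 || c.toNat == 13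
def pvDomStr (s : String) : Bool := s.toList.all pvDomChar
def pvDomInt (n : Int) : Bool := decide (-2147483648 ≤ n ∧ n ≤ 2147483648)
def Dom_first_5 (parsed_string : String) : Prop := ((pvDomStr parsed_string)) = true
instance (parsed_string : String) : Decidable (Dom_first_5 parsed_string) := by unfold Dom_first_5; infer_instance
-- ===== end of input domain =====

-- B materializes the non-empty fields once and uses slice+join and len, instead of A's
-- two-branch interleaved accumulation with a countdown counter (objective: simpler).

-- ===== PORT A =====
-- parsed_string.split("|"): sep "|" ≠ "" so PySem.Str.split? is always `some`; .getD [] is exact here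
def first_5 (parsed_string : String) : String × Int :=
  if ((PySem.Str.split? parsed_string "|").getD []).length > 5 then
    let st := ((PySem.Str.split? parsed_string "|").getD []).foldl
      (fun (st : String × Int × Int) item =>
        let st : String × Int × Int :=
          if st.2.1 > 0 ∧ PySem.Str.len item > 0 then
            (st.1 ++ "|" ++ item, (st.2.1 - 1, st.2.2))
          else st
        if PySem.Str.len item > 0 then (st.1, (st.2.1, st.2.2 + 1)) else st)
      ("", (5, 0))
    (st.1, st.2.2)
  else
    ((PySem.Str.split? parsed_string "|").getD []).foldl
      (fun (st : String × Int) item =>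
        if PySem.Str.len item > 0 then (st.1 ++ "|" ++ item, st.2 + 1) else st)
      ("", 0)

-- ===== PORT B =====
def first_5_alt (parsed_string : String) : String × Int :=
  let items := ((PySem.Str.split? parsed_string "|").getD []).filter
    (fun x => decide (0 < PySem.Str.len x))
  (PySem.Str.join "" ((items.take 5).map (fun x => "|" ++ x)), (items.length : Int))

-- ===== PRECONDITION & SPEC =====
def Spec_first_5 (parsed_string : String) (out : String × Int) : Prop := out = first_5_alt parsed_string
instance (parsed_string : String) (out : String × Int) : Decidable (Spec_first_5 parsed_string out) := by unfold Spec_first_5; infer_instance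

-- ===== CLAIM (what is proved, stated in full; the proofs are below) =====
def Claim_equal_first_5 : Prop := ∀ (parsed_string : String), Dom_first_5 parsed_string → Spec_first_5 parsed_string (first_5 parsed_string)

-- ===== LEMMAS AND PROOFS =====

-- the non-empty test, the joined string, and the two loop bodies of port A (defeq copies)
def pvP (x : String) : Bool := decide (0 < PySem.Str.len x)

def pvJ (l : List String) : String := PySem.Str.join "" (l.map (fun x => "|" ++ x))

def pvStepA (st : String × Int × Int) (item : String) : String × Int × Int :=
  let st : String × Int × Int :=
    if st.2.1 > 0 ∧ PySem.Str.len item > 0 then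
      (st.1 ++ "|" ++ item, (st.2.1 - 1, st.2.2))
    else st
  if PySem.Str.len item > 0 then (st.1, (st.2.1, st.2.2 + 1)) else st

def pvStepB (st : String × Int) (item : String) : String × Int :=
  if PySem.Str.len item > 0 then (st.1 ++ "|" ++ item, st.2 + 1) else st

theorem pvJ_nil : pvJ [] = "" := by decide

theorem pvJ_cons (x : String) (l : List String) : pvJ (x :: l) = "|" ++ x ++ pvJ l := by
  apply String.toList_inj.mp
  simp only [pvJ, PySem.Str.toList_join, PySem.Chars.join, List.intercalate,
    String.toList_append, List.map_cons]
  cases l <;> simp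

theorem pv_foldB (l : List String) (r : String) (c : Int) :
    l.foldl pvStepB (r, c) = (r ++ pvJ (l.filter pvP), c + (l.filter pvP).length) := by
  induction l generalizing r c with
  | nil => simp [pvJ_nil]
  | cons x t ih =>
    by_cases h : 0 < PySem.Str.len x
    · have hx : pvP x = true := by unfold pvP; exact decide_eq_true h
      have hne : x ≠ "" := by
        have h2 := h; simp [PySem.Str.len] at h2
        simpa [← String.length_eq_zero_iff] using h2.ne'
      have hstep : pvStepB (r, c) x = (r ++ "|" ++ x, c + 1) := by
        simp [pvStepB, hne]
      rw [List.foldl_cons, hstep, ih, List.filter_cons, hx]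
      simp only [if_pos, pvJ_cons, List.length_cons]
      refine Prod.ext ?_ ?_
      · simp [String.append_assoc]
      · push_cast; ring
    · have hx : pvP x = false := by unfold pvP; exact decide_eq_false h
      have heq : x = "" := by
        have h2 := h; simp [PySem.Str.len] at h2
        simpa [← String.length_eq_zero_iff] using h2
      have hstep : pvStepB (r, c) x = (r, c) := by
        simp [pvStepB, heq]
      rw [List.foldl_cons, hstep, ih, List.filter_cons, hx]
      simp

theorem pv_foldA (l : List String) (r : String) (i c : Int) (hi : 0 ≤ i) :
    (l.foldl pvStepA (r, (i, c))).1 = r ++ pvJ ((l.filter pvP).take i.toNat)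
    ∧ (l.foldl pvStepA (r, (i, c))).2.2 = c + (l.filter pvP).length := by
  induction l generalizing r i c with
  | nil => simp [pvJ_nil]
  | cons x t ih =>
    by_cases h : 0 < PySem.Str.len x
    · have hx : pvP x = true := by unfold pvP; exact decide_eq_true h
      by_cases hp : 0 < i
      · have hne : x ≠ "" := by
          have h2 := h; simp [PySem.Str.len] at h2
          simpa [← String.length_eq_zero_iff] using h2.ne'
        have hlp : 0 < x.length := by
          simpa [Nat.pos_iff_ne_zero, String.length_eq_zero_iff] using hne
        have hstep : pvStepA (r, (i, c)) x = (r ++ "|" ++ x, (i - 1, c + 1)) := by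
          simp [pvStepA, hlp, hp]
        rw [List.foldl_cons, hstep]
        obtain ⟨ih1, ih2⟩ := ih (r ++ "|" ++ x) (i - 1) (c + 1) (by omega)
        constructor
        · rw [ih1, List.filter_cons, hx]
          have htn : i.toNat = (i - 1).toNat + 1 := by omega
          simp only [if_pos, htn, List.take_succ_cons, pvJ_cons]
          simp [String.append_assoc]
        · rw [ih2, List.filter_cons, hx]
          simp only [if_pos, List.length_cons]
          push_cast; ring
      · have hi0 : i = 0 := by omega
        subst hi0
        have hne : x ≠ "" := by
          have h2 := h; simp [PySem.Str.len] at h2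
          simpa [← String.length_eq_zero_iff] using h2.ne'
        have hstep : pvStepA (r, ((0 : Int), c)) x = (r, (0, c + 1)) := by
          simp [pvStepA, hne]
        rw [List.foldl_cons, hstep]
        obtain ⟨ih1, ih2⟩ := ih r 0 (c + 1) (by omega)
        constructor
        · rw [ih1]; simp
        · rw [ih2, List.filter_cons, hx]
          simp only [if_pos, List.length_cons]
          push_cast; ring
    · have hx : pvP x = false := by unfold pvP; exact decide_eq_false h
      have heq : x = "" := by
        have h2 := h; simp [PySem.Str.len] at h2
        simpa [← String.length_eq_zero_iff] using h2
      have hstep : pvStepA (r, (i, c)) x = (r, (i, c)) := by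
        simp [pvStepA, heq]
      rw [List.foldl_cons, hstep]
      obtain ⟨ih1, ih2⟩ := ih r i c hi
      rw [ih1, ih2, List.filter_cons, hx]
      simp

-- ===== VERDICT (by name: the statement is the Claim_ definition above) =====
theorem first_5_spec : Claim_equal_first_5 := by
  intro s _
  show first_5 s = first_5_alt s
  have halt : first_5_alt s
      = (pvJ ((((PySem.Str.split? s "|").getD []).filter pvP).take 5),
         ((((PySem.Str.split? s "|").getD []).filter pvP).length : Int)) := rfl
  rw [halt]
  unfold first_5
  by_cases hlen : ((PySem.Str.split? s "|").getD []).length > 5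
  · rw [if_pos hlen]
    set l := (PySem.Str.split? s "|").getD [] with hl
    show ((l.foldl pvStepA ("", (5, 0))).1, (l.foldl pvStepA ("", (5, 0))).2.2) = _
    obtain ⟨h1, h2⟩ := pv_foldA l "" 5 0 (by omega)
    rw [h1, h2]
    have htn : ((5 : Int)).toNat = 5 := by decide
    rw [htn]
    simp
  · rw [if_neg hlen]
    set l := (PySem.Str.split? s "|").getD [] with hl
    show l.foldl pvStepB ("", 0) = _
    rw [pv_foldB l "" 0]
    have htake : (l.filter pvP).take 5 = l.filter pvP :=
      List.take_of_length_le (le_trans (List.length_filter_le _ _) (by omega))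
    rw [htake]
    simp
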